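-- pv_equiv track=rewrite | github.com/Projet-et-Tech/Simulation | src/simulation/pathfollowing.py | extract_major_positions
-- ===== SOURCE A (Python) =====
-- def determine_direction(x1, y1, x2, y2):
--     """Determine the direction of movement between two points."""
--     if y1 == y2:  # Horizontal
--         return "horizontal"
--     elif x1 == x2:  # Vertical
--         return "vertical"
--     elif x2 > x1 and y2 > y1:  # Top-Right Diagonal
--         return "top-right"
--     elif x2 < x1 and y2 > y1:  # Top-Left Diagonal
--         return "top-left"
--     elif x2 > x1 and y2 < y1:  # Bottom-Right Diagonal
--         return "bottom-right"
--     elif x2 < x1 and y2 < y1:  # Bottom-Left Diagonal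
--         return "bottom-left"
--     else:
--         return "none"
--
-- def extract_major_positions(path_x, path_y):
--     """Extract major positions from separate lists of x and y coordinates."""
--     if not path_x or not path_y or len(path_x) != len(path_y):
--         return [], []  # Return empty lists if input is invalid
--
--     len_x = len(path_x)
--     major_positions = []
--     current_start = 0
--     current_direction = determine_direction(path_x[0], path_y[0], path_x[1], path_y[1])
--
--     for i in range(2, len_x):
--         direction = determine_direction(path_x[i-1], path_y[i-1], path_x[i], path_y[i])
--         if direction != current_direction:
--             major_positions.append(current_start)
--             # Add the current position as a new major position
--             current_start = i-1
--             current_direction = direction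
--
--     # Add the last line's start point if it's not already added
--     if current_start != len_x-1:
--         major_positions.append(current_start)
--         major_positions.append(len_x-1)
--
--     return list(major_positions)
-- ===== SOURCE B (Python) =====
-- def determine_direction(x1, y1, x2, y2):
--     """Determine the direction of movement between two points."""
--     if y1 == y2:
--         return "horizontal"
--     elif x1 == x2:
--         return "vertical"
--     elif x2 > x1 and y2 > y1:
--         return "top-right"
--     elif x2 < x1 and y2 > y1:
--         return "top-left"
--     elif x2 > x1 and y2 < y1:
--         return "bottom-right"
--     elif x2 < x1 and y2 < y1:
--         return "bottom-left"
--     else: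
--         return "none"
--
-- def extract_major_positions(path_x, path_y):
--     """Extract major positions: run starts of the direction sequence plus the last index."""
--     if len(path_x) < 2 or len(path_x) != len(path_y):
--         return [], []
--     pts = list(zip(path_x, path_y))
--     d = [determine_direction(x1, y1, x2, y2)
--          for (x1, y1), (x2, y2) in zip(pts, pts[1:])]
--     starts = [0] + [k for k in range(1, len(d)) if d[k] != d[k - 1]]
--     return starts + [len(path_x) - 1]
-- ===== Notes on version B (the rewrite author's own statement) =====
-- stated objective: idiomatic
-- what changed: B first materialises the whole adjacent-pair direction list with a zip comprehension, then derives run starts by a pairwise d[k]!=d[k-1] filter and appends the last index unconditionally, instead of A's stateful single loop that carries current_start/current_direction and a final conditional append. Pre_ excludes empty or length-mismatched inputs, on which A returns the tuple ([], []) instead of a single list of ints, and single-point inputs, on which A raises IndexError.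
-- outside the precondition, e.g. on extract_major_positions([], []): A returns [[], []], B returns [[], []]; on extract_major_positions([1, 2], [0]): A returns [[], []], B returns [[], []]
import Mathlib
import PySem

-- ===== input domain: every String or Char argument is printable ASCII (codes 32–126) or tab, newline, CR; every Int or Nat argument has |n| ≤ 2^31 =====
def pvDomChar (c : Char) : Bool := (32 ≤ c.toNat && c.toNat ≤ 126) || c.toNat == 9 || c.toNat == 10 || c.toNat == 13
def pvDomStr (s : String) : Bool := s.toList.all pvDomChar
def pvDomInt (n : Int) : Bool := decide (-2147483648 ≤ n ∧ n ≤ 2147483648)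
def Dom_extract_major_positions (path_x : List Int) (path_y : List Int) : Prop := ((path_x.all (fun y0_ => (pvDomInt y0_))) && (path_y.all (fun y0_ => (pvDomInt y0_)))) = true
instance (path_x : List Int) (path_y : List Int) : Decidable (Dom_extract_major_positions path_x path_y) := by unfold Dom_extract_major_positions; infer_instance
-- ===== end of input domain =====

-- B builds the adjacent-pair direction list first and filters pairwise changes, instead of A's
-- stateful loop carrying current_start/current_direction (objective: idiomatic decomposition).


-- ===== PORT A =====
def determine_direction (x1 y1 x2 y2 : Int) : String :=
  if y1 = y2 then "horizontal"
  else if x1 = x2 then "vertical"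
  else if x2 > x1 ∧ y2 > y1 then "top-right"
  else if x2 < x1 ∧ y2 > y1 then "top-left"
  else if x2 > x1 ∧ y2 < y1 then "bottom-right"
  else if x2 < x1 ∧ y2 < y1 then "bottom-left"
  else "none"

-- xs[i]: inside Pre_ every index A uses is in range, so the .getD 0 default is never taken
def pvIx (xs : List Int) (i : Int) : Int := (PySem.List.pyGet? xs i).getD 0

def extract_major_positions (path_x : List Int) (path_y : List Int) : List Int :=
  if path_x = [] ∨ path_y = [] ∨ path_x.length ≠ path_y.length then
    []  -- Python returns the TUPLE ([], []) here, not a single list; excluded by Pre_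
  else
    let len_x : Int := path_x.length
    let current_direction :=
      determine_direction (pvIx path_x 0) (pvIx path_y 0) (pvIx path_x 1) (pvIx path_y 1)
    let st := (PySem.List.pyRange 2 len_x 1).foldl
      (fun (st : List Int × Int × String) i =>
        let direction :=
          determine_direction (pvIx path_x (i-1)) (pvIx path_y (i-1)) (pvIx path_x i) (pvIx path_y i)
        if direction ≠ st.2.2 then (st.1 ++ [st.2.1], i - 1, direction) else st)
      ([], 0, current_direction)
    if st.2.1 ≠ len_x - 1 then st.1 ++ [st.2.1, len_x - 1] else st.1

-- ===== PORT B =====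
def extract_major_positions_alt (path_x : List Int) (path_y : List Int) : List Int :=
  if path_x.length < 2 ∨ path_x.length ≠ path_y.length then
    []  -- Python B returns the tuple ([], []) here; excluded by Pre_
  else
    let pts := path_x.zip path_y
    let d := (pts.zip pts.tail).map (fun q => determine_direction q.1.1 q.1.2 q.2.1 q.2.2)
    let starts := (0 : Int) :: (PySem.List.pyRange 1 (d.length : Int) 1).filter
      (fun k => PySem.List.pyGet? d k ≠ PySem.List.pyGet? d (k - 1))
    starts ++ [(path_x.length : Int) - 1]

-- ===== PRECONDITION & SPEC =====
-- Pre_ excludes empty or length-mismatched inputs, where A returns the tuple ([], []) rather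
-- than a value of the declared list-of-int type, and single-point inputs, where A raises
-- IndexError (path_x.tail ≠ [] says the path has at least two points).
def Pre_extract_major_positions (path_x : List Int) (path_y : List Int) : Prop :=
  path_x.length = path_y.length ∧ path_x.tail ≠ []
instance (path_x : List Int) (path_y : List Int) : Decidable (Pre_extract_major_positions path_x path_y) := by unfold Pre_extract_major_positions; infer_instance
def pvWitness_extract_major_positions : List Int × List Int := ([0, 1, 2, 2], [0, 0, 0, 1])

def Spec_extract_major_positions (path_x : List Int) (path_y : List Int) (out : List Int) : Prop := out = extract_major_positions_alt path_x path_y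
instance (path_x : List Int) (path_y : List Int) (out : List Int) : Decidable (Spec_extract_major_positions path_x path_y out) := by unfold Spec_extract_major_positions; infer_instance

-- ===== CLAIM (what is proved, stated in full; the proofs are below) =====
def Claim_equal_extract_major_positions : Prop := ∀ (path_x : List Int) (path_y : List Int), Dom_extract_major_positions path_x path_y → Pre_extract_major_positions path_x path_y → Spec_extract_major_positions path_x path_y (extract_major_positions path_x path_y)

-- ===== LEMMAS AND PROOFS =====

-- direction of the segment from point k to point k+1 (getD-based, total)
def dirAt (px py : List Int) (k : Nat) : String :=
  determine_direction (px.getD k 0) (py.getD k 0) (px.getD (k+1) 0) (py.getD (k+1) 0)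

-- A's loop body re-indexed by the Nat position k (i = 2 + k)
def bodyK (px py : List Int) (st : List Int × Int × String) (k : Nat) : List Int × Int × String :=
  if dirAt px py (k+1) ≠ st.2.2 then (st.1 ++ [st.2.1], ((k : Int) + 1), dirAt px py (k+1)) else st

lemma pvIx_natCast (xs : List Int) (k : Nat) : pvIx xs (k : Int) = xs.getD k 0 := by
  simp [pvIx, PySem.List.pyGet?_natCast, List.getD_eq_getElem?_getD]

lemma body_eq (px py : List Int) (st : List Int × Int × String) (k : Nat) :
    (if determine_direction (pvIx px (2 + (k : Int) - 1)) (pvIx py (2 + (k : Int) - 1))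
          (pvIx px (2 + (k : Int))) (pvIx py (2 + (k : Int))) ≠ st.2.2 then
       (st.1 ++ [st.2.1], 2 + (k : Int) - 1,
        determine_direction (pvIx px (2 + (k : Int) - 1)) (pvIx py (2 + (k : Int) - 1))
          (pvIx px (2 + (k : Int))) (pvIx py (2 + (k : Int))))
     else st) = bodyK px py st k := by
  have h2 : (2 + (k : Int)) = ((k + 2 : Nat) : Int) := by push_cast; ring
  have h1 : ((k + 2 : Nat) : Int) - 1 = ((k + 1 : Nat) : Int) := by push_cast; ring
  simp only [h2, h1, pvIx_natCast, bodyK, dirAt]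
  norm_num

lemma invA (px py : List Int) (m : Nat) :
    ((List.range m).foldl (bodyK px py) ([], 0, dirAt px py 0)).1
      ++ [((List.range m).foldl (bodyK px py) ([], 0, dirAt px py 0)).2.1]
      = (0 : Int) :: List.map (fun k : Nat => ((k : Int) + 1))
          ((List.range m).filter (fun k => dirAt px py (k+1) ≠ dirAt px py k))
    ∧ ((List.range m).foldl (bodyK px py) ([], 0, dirAt px py 0)).2.2 = dirAt px py m
    ∧ ((List.range m).foldl (bodyK px py) ([], 0, dirAt px py 0)).2.1 ≤ (m : Int) := by
  induction m with
  | zero => simp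
  | succ m ih =>
    obtain ⟨ih1, ih2, ih3⟩ := ih
    rw [List.range_succ, List.foldl_append, List.foldl_cons, List.foldl_nil,
        List.filter_append]
    by_cases h : dirAt px py (m+1) = dirAt px py m
    · have hb : bodyK px py ((List.range m).foldl (bodyK px py) ([], 0, dirAt px py 0)) m
          = (List.range m).foldl (bodyK px py) ([], 0, dirAt px py 0) := by
        simp [bodyK, ih2, h]
      rw [hb]
      have hf : List.filter (fun k => decide (dirAt px py (k+1) ≠ dirAt px py k)) [m] = [] := by
        simp [h]
      rw [hf, List.append_nil]
      exact ⟨ih1, by rw [ih2, h], le_trans ih3 (by push_cast; omega)⟩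
    · have hb : bodyK px py ((List.range m).foldl (bodyK px py) ([], 0, dirAt px py 0)) m
          = (((List.range m).foldl (bodyK px py) ([], 0, dirAt px py 0)).1
              ++ [((List.range m).foldl (bodyK px py) ([], 0, dirAt px py 0)).2.1],
             ((m : Int) + 1), dirAt px py (m+1)) := by
        simp [bodyK, ih2, h]
      rw [hb]
      refine ⟨?_, rfl, by push_cast; omega⟩
      have hf : List.filter (fun k => decide (dirAt px py (k+1) ≠ dirAt px py k)) [m] = [m] := by
        simp [h]
      rw [hf, List.map_append, ih1]
      simp

-- element k of B's direction list is dirAt k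
lemma d_elem (px py : List Int) (hlen : px.length = py.length) (k : Nat)
    (hk : k + 1 < px.length) :
    (((px.zip py).zip (px.zip py).tail).map
        (fun q => determine_direction q.1.1 q.1.2 q.2.1 q.2.2))[k]?
      = some (dirAt px py k) := by
  have hz : (px.zip py).length = px.length := by simp [hlen]
  have hzz : ((px.zip py).zip (px.zip py).tail).length = px.length - 1 := by
    simp [hz]; omega
  have hk' : k < ((px.zip py).zip (px.zip py).tail).length := by omega
  rw [List.getElem?_map, List.getElem?_eq_getElem hk']
  simp only [Option.map_some]
  congr 1
  have h1 : ((px.zip py).zip (px.zip py).tail)[k] = ((px.zip py)[k]'(by omega), (px.zip py).tail[k]'(by simp; omega)) := by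
    exact List.getElem_zip
  rw [h1]
  have h2 : (px.zip py)[k]'(by omega) = (px[k]'(by omega), py[k]'(by omega)) :=
    List.getElem_zip
  have h3 : (px.zip py).tail[k]'(by simp; omega) = (px.zip py)[k+1]'(by omega) := by
    rw [List.getElem_tail]
  have h4 : (px.zip py)[k+1]'(by omega) = (px[k+1]'(by omega), py[k+1]'(by omega)) :=
    List.getElem_zip
  rw [h2, h3, h4]
  simp [dirAt, List.getD_eq_getElem?_getD, hk,
    show k < px.length by omega, show k < py.length by omega, show k + 1 < py.length by omega]

-- ===== VERDICT (by name: the statement is the Claim_ definition above) =====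
theorem extract_major_positions_spec : Claim_equal_extract_major_positions := by
  intro px py _ hpre
  obtain ⟨hlen, htl⟩ := hpre
  have hn : 2 ≤ px.length := by
    have h2 : 0 < px.tail.length := List.length_pos_of_ne_nil htl
    rw [List.length_tail] at h2; omega
  simp only [Spec_extract_major_positions, extract_major_positions, extract_major_positions_alt]
  have hxne : px ≠ [] := by rintro rfl; simp at hn
  have hyne : py ≠ [] := by rintro rfl; rw [List.length_nil] at hlen; omega
  rw [if_neg (by simp only [not_or]; exact ⟨hxne, hyne, by omega⟩),
      if_neg (show ¬(px.length < 2 ∨ px.length ≠ py.length) by omega)]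
  -- A side: fold over pyRange 2 n → fold of bodyK over List.range (n-2)
  have htn : (((px.length : Int)) - 2).toNat = px.length - 2 := by omega
  rw [PySem.List.pyRange_one, htn, List.foldl_map]
  have hinit : determine_direction (pvIx px 0) (pvIx py 0) (pvIx px 1) (pvIx py 1)
      = dirAt px py 0 := by
    have h0 : (0 : Int) = ((0 : Nat) : Int) := rfl
    have h1 : (1 : Int) = ((1 : Nat) : Int) := rfl
    rw [h0, h1, pvIx_natCast, pvIx_natCast, pvIx_natCast, pvIx_natCast]
    rfl
  rw [hinit]
  have hAB : List.foldl
      (fun (x : List Int × Int × String) (y : Nat) =>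
        if determine_direction (pvIx px (2 + (y : Int) - 1)) (pvIx py (2 + (y : Int) - 1))
              (pvIx px (2 + (y : Int))) (pvIx py (2 + (y : Int))) ≠ x.2.2 then
          (x.1 ++ [x.2.1], 2 + (y : Int) - 1,
           determine_direction (pvIx px (2 + (y : Int) - 1)) (pvIx py (2 + (y : Int) - 1))
             (pvIx px (2 + (y : Int))) (pvIx py (2 + (y : Int))))
        else x)
      ([], 0, dirAt px py 0) (List.range (px.length - 2))
      = List.foldl (bodyK px py) ([], 0, dirAt px py 0) (List.range (px.length - 2)) :=
    PySem.List.foldl_congr_mem _ _ _ _ (fun acc k _ => body_eq px py acc k)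
  rw [hAB]
  obtain ⟨inv1, -, inv3⟩ := invA px py (px.length - 2)
  set st := (List.range (px.length - 2)).foldl (bodyK px py) ([], 0, dirAt px py 0) with hst
  have hcs : st.2.1 ≠ (px.length : Int) - 1 := by
    have hc : ((px.length - 2 : Nat) : Int) = (px.length : Int) - 2 := by omega
    rw [hc] at inv3; omega
  rw [if_pos hcs]
  -- B side
  set d := (((px.zip py).zip (px.zip py).tail).map
      (fun q => determine_direction q.1.1 q.1.2 q.2.1 q.2.2)) with hd
  have hz : (px.zip py).length = px.length := by simp [← hlen]
  have hdl : d.length = px.length - 1 := by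
    rw [hd]; simp only [List.length_map, List.length_zip, List.length_tail, hz]; omega
  have hrB : ((d.length : Nat) : Int) - 1 = ((px.length - 2 : Nat) : Int) := by
    rw [hdl]; omega
  rw [PySem.List.pyRange_one, hrB]
  rw [Int.toNat_natCast, List.filter_map]
  have hfc : (List.range (px.length - 2)).filter
        ((fun (k : Int) => decide (PySem.List.pyGet? d k ≠ PySem.List.pyGet? d (k - 1)))
          ∘ (fun (k : Nat) => 1 + (k : Int)))
      = (List.range (px.length - 2)).filter (fun (k : Nat) => dirAt px py (k+1) ≠ dirAt px py k) := by
    apply List.filter_congr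
    intro k hk
    rw [List.mem_range] at hk
    simp only [Function.comp, decide_eq_decide]
    have e1 : (1 + (k : Int)) = ((k + 1 : Nat) : Int) := by push_cast; ring
    have e2 : ((k + 1 : Nat) : Int) - 1 = ((k : Nat) : Int) := by push_cast; ring
    rw [e1, e2, PySem.List.pyGet?_natCast, PySem.List.pyGet?_natCast,
        d_elem px py hlen (k+1) (by omega), d_elem px py hlen k (by omega)]
    simp
  rw [hfc]
  have hmap : List.map (fun k : Nat => 1 + (k : Int))
        ((List.range (px.length - 2)).filter (fun k => dirAt px py (k+1) ≠ dirAt px py k))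
      = List.map (fun k : Nat => ((k : Int) + 1))
        ((List.range (px.length - 2)).filter (fun k => dirAt px py (k+1) ≠ dirAt px py k)) :=
    List.map_congr_left (fun k _ => by ring)
  rw [hmap, show st.1 ++ [st.2.1, ((px.length : Nat) : Int) - 1]
      = (st.1 ++ [st.2.1]) ++ [((px.length : Nat) : Int) - 1] by simp, inv1]
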